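-- pv_equiv track=rewrite | github.com/chrismmuc/kx-hub | src/embed/problem_matcher.py | check_for_contradiction
-- ===== SOURCE A (Python) =====
-- from typing import Any, Dict, List, Optional
--
-- def check_for_contradiction(
--     chunk_source_id: str,
--     existing_evidence: List[Dict[str, Any]],
--     relationships: List[Dict[str, Any]],
-- ) -> bool:
--     """
--     Check if a chunk's source contradicts any existing evidence sources.
--
--     Args:
--         chunk_source_id: Source ID of the new chunk
--         existing_evidence: List of existing evidence for the problem
--         relationships: List of relationships for the chunk's source
--
--     Returns:
--         True if contradiction found
--     """
--     # Get source IDs from existing evidence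
--     existing_source_ids = set()
--     for ev in existing_evidence:
--         source_id = ev.get("source_id")
--         if source_id:
--             existing_source_ids.add(source_id)
--
--     # Check if any relationship is a contradiction with existing sources
--     for rel in relationships:
--         if rel.get("type") == "contradicts":
--             target = rel.get("target_source")
--             if target in existing_source_ids:
--                 return True
--
--     return False
-- ===== SOURCE B (Python) =====
-- from typing import Any, Dict, List
--
-- def check_for_contradiction(
--     chunk_source_id: str,
--     existing_evidence: List[Dict[str, Any]],
--     relationships: List[Dict[str, Any]],
-- ) -> bool:
--     """Direct pairwise check: a contradiction exists iff some 'contradicts'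
--     relationship's target equals some (truthy) existing source id.
--     No set is built; each candidate pair is compared directly."""
--     return any(
--         rel.get("type") == "contradicts"
--         and any(
--             ev.get("source_id") and rel.get("target_source") == ev.get("source_id")
--             for ev in existing_evidence
--         )
--         for rel in relationships
--     )
-- ===== Notes on version B (the rewrite author's own statement) =====
-- stated objective: alternative
-- what changed: Removes the intermediate set of existing source ids entirely: B is a direct nested any-over-pairs comparison (each 'contradicts' relationship's target compared against each evidence source id), trading A's set-building O(E+R) pass for an O(E*R) pairwise scan.
import Mathlib
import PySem

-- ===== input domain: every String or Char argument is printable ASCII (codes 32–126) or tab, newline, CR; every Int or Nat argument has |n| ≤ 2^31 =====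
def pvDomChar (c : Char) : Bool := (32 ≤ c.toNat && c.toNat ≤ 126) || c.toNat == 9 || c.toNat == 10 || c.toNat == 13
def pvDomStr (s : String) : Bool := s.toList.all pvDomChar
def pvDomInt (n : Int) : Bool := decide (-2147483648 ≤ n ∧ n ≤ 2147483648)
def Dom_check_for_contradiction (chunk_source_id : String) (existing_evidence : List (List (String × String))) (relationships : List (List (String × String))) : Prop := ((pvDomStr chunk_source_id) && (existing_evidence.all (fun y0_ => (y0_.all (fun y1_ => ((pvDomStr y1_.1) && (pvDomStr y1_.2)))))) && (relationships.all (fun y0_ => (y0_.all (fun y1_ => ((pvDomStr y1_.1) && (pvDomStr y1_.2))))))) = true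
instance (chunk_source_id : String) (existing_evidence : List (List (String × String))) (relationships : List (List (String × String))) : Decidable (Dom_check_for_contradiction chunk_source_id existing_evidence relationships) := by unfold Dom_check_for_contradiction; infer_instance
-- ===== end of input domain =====

-- B removes A's intermediate set of source ids: it is a direct nested any-over-pairs
-- comparison of 'contradicts' targets against evidence source ids (objective: alternative).

-- ===== PORT A =====
-- dict.get(k): first-match lookup in the association list
def pvGetA (d : List (String × String)) (k : String) : Option String := List.lookup k d

-- 'for ev in existing_evidence: … if source_id: set.add' — truthy string = non-empty
def pvExistingA (existing_evidence : List (List (String × String))) : PySem.Set String :=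
  existing_evidence.foldl
    (fun s ev =>
      match pvGetA ev "source_id" with
      | some sid => if sid ≠ "" then PySem.Set.add s sid else s
      | none => s)
    PySem.Set.empty

-- 'for rel in relationships: if type == "contradicts" and target in set: return True'
-- (rel.get("target_source") may be None; None is never a member of a set of strings)
def pvLoopA (s : PySem.Set String) : List (List (String × String)) → Bool
  | [] => false
  | rel :: rest =>
    if pvGetA rel "type" == some "contradicts" then
      match pvGetA rel "target_source" with
      | some t => if PySem.Set.contains s t then true else pvLoopA s rest
      | none => pvLoopA s rest
    else pvLoopA s rest

def check_for_contradiction (chunk_source_id : String) (existing_evidence : List (List (String × String))) (relationships : List (List (String × String))) : Bool :=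
  pvLoopA (pvExistingA existing_evidence) relationships

-- ===== PORT B =====
-- Python inner generator: 'ev.get("source_id") and rel.get("target_source") == ev.get("source_id")'
-- — truthy string = non-empty; a None target never equals a string source id.
def pvPairB (rel ev : List (String × String)) : Bool :=
  match List.lookup "source_id" ev with
  | some sid => decide (sid ≠ "") && (List.lookup "target_source" rel == some sid)
  | none => false

def check_for_contradiction_alt (chunk_source_id : String) (existing_evidence : List (List (String × String))) (relationships : List (List (String × String))) : Bool :=
  relationships.any (fun rel =>
    (List.lookup "type" rel == some "contradicts") &&
    existing_evidence.any (fun ev => pvPairB rel ev))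

-- ===== PRECONDITION & SPEC =====
def Spec_check_for_contradiction (chunk_source_id : String) (existing_evidence : List (List (String × String))) (relationships : List (List (String × String))) (out : Bool) : Prop := out = check_for_contradiction_alt chunk_source_id existing_evidence relationships
instance (chunk_source_id : String) (existing_evidence : List (List (String × String))) (relationships : List (List (String × String))) (out : Bool) : Decidable (Spec_check_for_contradiction chunk_source_id existing_evidence relationships out) := by unfold Spec_check_for_contradiction; infer_instance

-- ===== CLAIM =====
def Claim_equal_check_for_contradiction : Prop := ∀ (chunk_source_id : String) (existing_evidence : List (List (String × String))) (relationships : List (List (String × String))), Dom_check_for_contradiction chunk_source_id existing_evidence relationships → Spec_check_for_contradiction chunk_source_id existing_evidence relationships (check_for_contradiction chunk_source_id existing_evidence relationships)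

-- ===== LEMMAS AND PROOFS =====

theorem mem_foldlExisting (l : List (List (String × String))) (s : PySem.Set String) (x : String) :
    (x ∈ l.foldl
      (fun s ev =>
        match pvGetA ev "source_id" with
        | some sid => if sid ≠ "" then PySem.Set.add s sid else s
        | none => s) s)
    ↔ x ∈ s ∨ ∃ ev ∈ l, List.lookup "source_id" ev = some x ∧ x ≠ "" := by
  induction l generalizing s with
  | nil => simp
  | cons ev rest ih =>
    simp only [List.foldl_cons, ih, List.mem_cons]
    cases h : List.lookup "source_id" ev with
    | none =>
      simp only [pvGetA, h]
      constructor
      · rintro (hs | ⟨e, he, hl, hx⟩)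
        · exact Or.inl hs
        · exact Or.inr ⟨e, Or.inr he, hl, hx⟩
      · rintro (hs | ⟨e, (rfl | he), hl, hx⟩)
        · exact Or.inl hs
        · simp [h] at hl
        · exact Or.inr ⟨e, he, hl, hx⟩
    | some sid =>
      simp only [pvGetA, h]
      by_cases hne : sid = ""
      · rw [if_neg (not_not_intro hne)]
        constructor
        · rintro (hs | ⟨e, he, hl, hx⟩)
          · exact Or.inl hs
          · exact Or.inr ⟨e, Or.inr he, hl, hx⟩
        · rintro (hs | ⟨e, (rfl | he), hl, hx⟩)
          · exact Or.inl hs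
          · rw [h] at hl
            exact absurd ((Option.some_inj.mp hl) ▸ hne) hx
          · exact Or.inr ⟨e, he, hl, hx⟩
      · rw [if_pos hne]
        simp only [PySem.Set.mem_add]
        constructor
        · rintro ((hs | rfl) | ⟨e, he, hl, hx⟩)
          · exact Or.inl hs
          · exact Or.inr ⟨ev, Or.inl rfl, h, hne⟩
          · exact Or.inr ⟨e, Or.inr he, hl, hx⟩
        · rintro (hs | ⟨e, (rfl | he), hl, hx⟩)
          · exact Or.inl (Or.inl hs)
          · rw [h] at hl
            exact Or.inl (Or.inr (Option.some_inj.mp hl).symm)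
          · exact Or.inr ⟨e, he, hl, hx⟩

theorem mem_existingA (l : List (List (String × String))) (x : String) :
    x ∈ pvExistingA l ↔ ∃ ev ∈ l, List.lookup "source_id" ev = some x ∧ x ≠ "" := by
  unfold pvExistingA
  rw [mem_foldlExisting]
  simp [PySem.Set.empty]

theorem loopA_iff (s : PySem.Set String) (rels : List (List (String × String))) :
    pvLoopA s rels = true ↔
      ∃ rel ∈ rels, List.lookup "type" rel = some "contradicts" ∧
        ∃ t, List.lookup "target_source" rel = some t ∧ t ∈ s := by
  induction rels with
  | nil => simp [pvLoopA]
  | cons rel rest ih =>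
    simp only [List.mem_cons]
    by_cases htyp : List.lookup "type" rel = some "contradicts"
    · cases htgt : List.lookup "target_source" rel with
      | none =>
        simp only [pvLoopA, pvGetA, htyp, htgt, BEq.rfl, if_true, ih]
        constructor
        · rintro ⟨r, hr, h1, h2⟩
          exact ⟨r, Or.inr hr, h1, h2⟩
        · rintro ⟨r, (rfl | hr), h1, t, h2, h3⟩
          · rw [htgt] at h2; exact absurd h2 (by simp)
          · exact ⟨r, hr, h1, t, h2, h3⟩
      | some t =>
        by_cases hmem : t ∈ s
        · simp only [pvLoopA, pvGetA, htyp, htgt, BEq.rfl, if_true,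
            (PySem.Set.contains_iff s t).mpr hmem, true_iff]
          exact ⟨rel, Or.inl rfl, htyp, t, htgt, hmem⟩
        · have hc : PySem.Set.contains s t = false := by
            rw [Bool.eq_false_iff]
            intro hcon
            exact hmem ((PySem.Set.contains_iff s t).mp hcon)
          simp only [pvLoopA, pvGetA, htyp, htgt, BEq.rfl, if_true, hc,
            Bool.false_eq_true, if_false, ih]
          constructor
          · rintro ⟨r, hr, h1, h2⟩
            exact ⟨r, Or.inr hr, h1, h2⟩
          · rintro ⟨r, (rfl | hr), h1, t', h2, h3⟩
            · rw [htgt] at h2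
              exact absurd ((Option.some_inj.mp h2) ▸ h3) hmem
            · exact ⟨r, hr, h1, t', h2, h3⟩
    · have hb : (List.lookup "type" rel == some "contradicts") = false := by
        rw [Bool.eq_false_iff]
        intro hcon
        exact htyp (eq_of_beq hcon)
      simp only [pvLoopA, pvGetA, hb, Bool.false_eq_true, if_false, ih]
      constructor
      · rintro ⟨r, hr, h1, h2⟩
        exact ⟨r, Or.inr hr, h1, h2⟩
      · rintro ⟨r, (rfl | hr), h1, h2⟩
        · exact absurd h1 htyp
        · exact ⟨r, hr, h1, h2⟩

theorem pairB_iff (rel ev : List (String × String)) :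
    pvPairB rel ev = true ↔
      ∃ sid, List.lookup "source_id" ev = some sid ∧ sid ≠ "" ∧
        List.lookup "target_source" rel = some sid := by
  unfold pvPairB
  cases h : List.lookup "source_id" ev with
  | none => simp
  | some sid =>
    simp only [Bool.and_eq_true, decide_eq_true_eq, beq_iff_eq, Option.some_inj]
    constructor
    · rintro ⟨h1, h2⟩; exact ⟨sid, rfl, h1, h2⟩
    · rintro ⟨s', hs', h1, h2⟩
      subst hs'
      exact ⟨h1, h2⟩

theorem altB_iff (ee rels : List (List (String × String))) (cs : String) :
    check_for_contradiction_alt cs ee rels = true ↔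
      ∃ rel ∈ rels, List.lookup "type" rel = some "contradicts" ∧
        ∃ ev ∈ ee, ∃ sid, List.lookup "source_id" ev = some sid ∧ sid ≠ "" ∧
          List.lookup "target_source" rel = some sid := by
  unfold check_for_contradiction_alt
  simp only [List.any_eq_true, Bool.and_eq_true, beq_iff_eq, pairB_iff]

-- ===== VERDICT =====
theorem check_for_contradiction_spec : Claim_equal_check_for_contradiction := by
  intro cs ee rels _
  unfold Spec_check_for_contradiction check_for_contradiction
  rw [Bool.eq_iff_iff, loopA_iff, altB_iff]
  constructor
  · rintro ⟨rel, hr, h1, t, h2, h3⟩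
    obtain ⟨ev, he, hl, hx⟩ := (mem_existingA ee t).mp h3
    exact ⟨rel, hr, h1, ev, he, t, hl, hx, h2⟩
  · rintro ⟨rel, hr, h1, ev, he, sid, hl, hx, h2⟩
    exact ⟨rel, hr, h1, sid, h2, (mem_existingA ee sid).mpr ⟨ev, he, hl, hx⟩⟩
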